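-- pv_equiv track=rewrite | github.com/QuiD-0/Algorithm | 이코테/구현/12-9문자열 압축.py | solution
-- ===== SOURCE A (Python) =====
-- def solution(s):
--     if len(s)==1: #문자열의 길이가 1일때
--         return 1
--     temp="" #압축후 문자열저장용
--     length=[] #압축후의 길이 배열
--     for i in range(1,len(s)//2+1): #문자열의 길이가 1~절반까지 반복
--         di=s[:i]
--         count=1
--         for j in range(i,len(s)+1,i): #i개의 길이로 쪼개기
--             if s[j:j+i]==di: #쪼갠 문자가 앞의 문자와 같을때
--                 count+=1
--             else: #다를때 문자열 이어 붙이기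
--                 if count==1:
--                     count=""
--                 temp+=str(count)+di
--                 di=s[j:j+i]
--                 count=1
--         if count == 1: #마지막 남은 단어 붙이기
--             count = ""
--         temp += str(count) + di
--         length.append(len(temp))
--         temp = ""
--     return min(length)
-- ===== SOURCE B (Python) =====
-- def solution(s):
--     n = len(s)
--     if n == 1:
--         return 1
--     # suffix LCP table: lcp[a][b] = longest common prefix of s[a:] and s[b:]
--     lcp = [[0] * (n + 1)]
--     for a in range(n - 1, -1, -1):
--         nxt = lcp[0]
--         lcp.insert(0, [nxt[b + 1] + 1 if s[a] == s[b] else 0 for b in range(n)] + [0])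
--     best = None
--     for i in range(1, n // 2 + 1):
--         total, run = 0, 1
--         for b in range(i, n, i):
--             if n - b >= i and lcp[b - i][b] >= i:
--                 run += 1
--             else:
--                 total += (len(str(run)) if run > 1 else 0) + i
--                 run = 1
--         total += (len(str(run)) if run > 1 else 0) + (n - (n - 1) // i * i)
--         if best is None or total < best:
--             best = total
--     return best
-- ===== Notes on version B (the rewrite author's own statement) =====
-- stated objective: alternative
-- what changed: B precomputes a suffix-LCP dynamic-programming table (lcp[a][b] = longest common prefix of s[a:] and s[b:]) once and then decides every chunk comparison by the O(1) arithmetic test n-b>=i and lcp[b-i][b]>=i, summing group lengths as integers, whereas A has no table and instead re-compares substrings with string equality and concatenates count+block into a growing compressed string per block size, measuring its length; B trades O(n^2) memory for the table and is slower in wall-clock time on large inputs.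
import Mathlib
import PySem

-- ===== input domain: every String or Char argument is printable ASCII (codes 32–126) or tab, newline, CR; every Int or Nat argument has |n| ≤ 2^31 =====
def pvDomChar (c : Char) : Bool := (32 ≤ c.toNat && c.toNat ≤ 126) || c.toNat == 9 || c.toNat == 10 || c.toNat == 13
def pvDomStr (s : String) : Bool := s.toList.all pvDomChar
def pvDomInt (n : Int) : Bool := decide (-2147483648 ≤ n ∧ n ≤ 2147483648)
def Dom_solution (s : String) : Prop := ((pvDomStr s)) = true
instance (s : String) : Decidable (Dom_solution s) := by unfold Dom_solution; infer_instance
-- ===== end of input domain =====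

-- B precomputes a suffix-LCP DP table once and decides every chunk comparison by an O(1)
-- arithmetic test, summing group lengths as integers; A re-compares substrings and builds the
-- compressed string per block size. Objective: alternative algorithm (B trades O(n^2) memory
-- for the table and is not faster in wall-clock time).

-- ===== PORT A =====
-- inner loop body of A: state (temp, di, count), one step per j in range(i, len(s)+1, i)
def aStep (s : String) (i : Int) (st : String × String × Int) (j : Int) : String × String × Int :=
  if PySem.Str.slice s (some j) (some (j + i)) = st.2.1 then
    (st.1, st.2.1, st.2.2 + 1)
  else
    (st.1 ++ (if st.2.2 = 1 then "" else PySem.Int.toStr st.2.2) ++ st.2.1,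
     PySem.Str.slice s (some j) (some (j + i)), 1)

-- after the inner loop: append the last word, take len(temp)
def aFlushLen (st : String × String × Int) : Int :=
  PySem.Str.len (st.1 ++ (if st.2.2 = 1 then "" else PySem.Int.toStr st.2.2) ++ st.2.1)

def solution (s : String) : Int :=
  if PySem.Str.len s = 1 then 1
  else
    let length : List Int :=
      (PySem.List.pyRange 1 (PySem.Int.floordiv (PySem.Str.len s) 2 + 1) 1).foldl
        (fun length i =>
          length ++ [aFlushLen ((PySem.List.pyRange i (PySem.Str.len s + 1) i).foldl
            (aStep s i) ("", PySem.Str.slice s none (some i), 1))])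
        []
    match PySem.List.min? length (fun x => x) with
    | some v => v
    | none => 0   -- unreachable under Pre_solution (Python: min([]) raises ValueError)

-- ===== PORT B =====
-- one new row of the suffix-LCP table: [nxt[b+1]+1 if s[a]==s[b] else 0 for b in range(n)] + [0]
def bRow (s : String) (n : Int) (nxt : List Int) (a : Int) : List Int :=
  ((PySem.List.pyRange 0 n 1).map (fun b =>
    if PySem.Str.pyGet? s a = PySem.Str.pyGet? s b
    then (PySem.List.pyGet? nxt (b + 1)).getD 0 + 1 else 0)) ++ [0]

-- the table-building loop: for a in range(n-1, -1, -1): lcp.insert(0, row from lcp[0])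
def bTable (s : String) : List (List Int) :=
  (PySem.List.pyRange (PySem.Str.len s - 1) (-1) (-1)).foldl
    (fun lcp a => bRow s (PySem.Str.len s) ((PySem.List.pyGet? lcp 0).getD []) a :: lcp)
    [List.replicate (PySem.Str.len s + 1).toNat 0]

-- inner loop body of B: state (total, run), one step per b in range(i, n, i)
def bStepN (s : String) (lcp : List (List Int)) (i : Int) (st : Int × Int) (b : Int) : Int × Int :=
  if PySem.Str.len s - b ≥ i ∧
      (PySem.List.pyGet? ((PySem.List.pyGet? lcp (b - i)).getD []) b).getD 0 ≥ i then
    (st.1, st.2 + 1)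
  else
    (st.1 + (if st.2 > 1 then PySem.Str.len (PySem.Int.toStr st.2) else 0) + i, 1)

-- candidate compressed length for one block size i
def bTotal (s : String) (lcp : List (List Int)) (i : Int) : Int :=
  let st := (PySem.List.pyRange i (PySem.Str.len s) i).foldl (bStepN s lcp i) (0, 1)
  st.1 + (if st.2 > 1 then PySem.Str.len (PySem.Int.toStr st.2) else 0)
    + (PySem.Str.len s - PySem.Int.floordiv (PySem.Str.len s - 1) i * i)

def solution_alt (s : String) : Int :=
  let n := PySem.Str.len s
  if n = 1 then 1
  else
    let lcp := bTable s
    let best : Option Int :=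
      (PySem.List.pyRange 1 (PySem.Int.floordiv n 2 + 1) 1).foldl
        (fun best i =>
          let total := bTotal s lcp i
          match best with
          | none => some total
          | some bst => if total < bst then some total else some bst)
        none
    match best with
    | some v => v
    | none => 0   -- unreachable under Pre_solution (Python B returns None only for s = "")

-- ===== PRECONDITION & SPEC =====
-- Pre_ excludes only the empty string: there Python A raises ValueError (min of an empty list).
def Pre_solution (s : String) : Prop := s ≠ ""
instance (s : String) : Decidable (Pre_solution s) := by unfold Pre_solution; infer_instance
def pvWitness_solution : String := "aabbaccc"

def Spec_solution (s : String) (out : Int) : Prop := out = solution_alt s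
instance (s : String) (out : Int) : Decidable (Spec_solution s out) := by unfold Spec_solution; infer_instance

-- ===== CLAIM (what is proved, stated in full; the proofs are below) =====
def Claim_equal_solution : Prop := ∀ (s : String), Dom_solution s → Pre_solution s → Spec_solution s (solution s)

-- ===== LEMMAS AND PROOFS =====

-- proof-side abbreviations: the per-block-size values the two ports compute
def chunkF (s : String) (i j : Int) : String := PySem.Str.slice s (some j) (some (j + i))

def lastD (p : Int) (t : List Int) : Int := (t.getLast?).getD p

def valA (s : String) (i : Int) : Int :=
  aFlushLen ((PySem.List.pyRange i (PySem.Str.len s + 1) i).foldl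
    (aStep s i) ("", PySem.Str.slice s none (some i), 1))

def minStep (b : Option Int) (t : Int) : Option Int :=
  match b with
  | none => some t
  | some x => if t < x then some t else some x

-- proof-side: B's loop body expressed on the pair of chunk strings (prev, cur)
def sStep (st : Int × Int) (pc : String × String) : Int × Int :=
  if pc.2 = pc.1 then (st.1, st.2 + 1)
  else (st.1 + (if st.2 > 1 then PySem.Str.len (PySem.Int.toStr st.2) else 0)
          + PySem.Str.len pc.1, 1)

-- proof-side: the longest-common-prefix function the table tabulates
def lcpC : List Char → List Char → Int
  | x :: xs, y :: ys => if x = y then lcpC xs ys + 1 else 0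
  | _, _ => 0

def rowSpec (cs : List Char) (a : Int) : List Int :=
  (PySem.List.pyRange 0 ((cs.length : Int) + 1) 1).map
    (fun b => lcpC (cs.drop a.toNat) (cs.drop b.toNat))

theorem lcpC_nil_right (xs : List Char) : lcpC xs [] = 0 := by
  cases xs <;> rfl

theorem lcpC_nonneg (xs ys : List Char) : 0 ≤ lcpC xs ys := by
  induction xs generalizing ys with
  | nil => simp [lcpC]
  | cons x xs ih =>
    cases ys with
    | nil => simp [lcpC]
    | cons y ys =>
      simp only [lcpC]
      split_ifs with h
      · have := ih ys; omega
      · omega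

theorem take_eq_iff_lcp (i : Nat) (xs ys : List Char) (h : i ≤ xs.length) :
    xs.take i = ys.take i ↔ (i ≤ ys.length ∧ (i : Int) ≤ lcpC xs ys) := by
  induction i generalizing xs ys with
  | zero => simpa using lcpC_nonneg xs ys
  | succ i ih =>
    cases xs with
    | nil => simp at h
    | cons x xs =>
      cases ys with
      | nil =>
        constructor
        · intro hc; simp at hc
        · intro hc; simp [lcpC_nil_right] at hc
      | cons y ys =>
        simp only [List.take_succ_cons, List.cons.injEq, List.length_cons, lcpC]
        constructor
        · rintro ⟨hxy, ht⟩
          have := (ih xs ys (by simpa using h)).1 ht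
          rw [if_pos hxy]
          constructor
          · omega
          · push_cast; omega
        · rintro ⟨hlen, hlcp⟩
          by_cases hxy : x = y
          · rw [if_pos hxy] at hlcp
            have := (ih xs ys (by simpa using h)).2 ⟨by omega, by push_cast at hlcp ⊢; omega⟩
            exact ⟨hxy, this⟩
          · rw [if_neg hxy] at hlcp; omega

theorem solution_as_valA (s : String) :
    solution s =
      if PySem.Str.len s = 1 then 1
      else
        match PySem.List.min?
            ((PySem.List.pyRange 1 (PySem.Int.floordiv (PySem.Str.len s) 2 + 1) 1).map (valA s))
            (fun x => x) with
        | some v => v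
        | none => 0 := by
  show (if PySem.Str.len s = 1 then (1 : Int)
      else
        match PySem.List.min?
            ((PySem.List.pyRange 1 (PySem.Int.floordiv (PySem.Str.len s) 2 + 1) 1).foldl
              (fun length i => length ++ [valA s i]) [])
            (fun x => x) with
        | some v => v
        | none => 0) = _
  rw [PySem.List.foldl_append_singleton_eq_map (valA s)]
  simp

theorem solution_alt_as_valN (s : String) :
    solution_alt s =
      if PySem.Str.len s = 1 then 1
      else
        match ((PySem.List.pyRange 1 (PySem.Int.floordiv (PySem.Str.len s) 2 + 1) 1).map
            (bTotal s (bTable s))).foldl minStep none with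
        | some v => v
        | none => 0 := by
  show (if PySem.Str.len s = 1 then (1 : Int)
      else
        match (PySem.List.pyRange 1 (PySem.Int.floordiv (PySem.Str.len s) 2 + 1) 1).foldl
            (fun best i => minStep best (bTotal s (bTable s) i)) none with
        | some v => v
        | none => 0) = _
  rw [← List.foldl_map]

theorem foldl_some_minStep (t : List Int) : ∀ (x : Int),
    t.foldl minStep (some x) = some (t.foldl min x) := by
  induction t with
  | nil => intro x; rfl
  | cons y u ih =>
    intro x
    simp only [List.foldl_cons]
    have h : minStep (some x) y = some (min x y) := by
      show (if y < x then some y else some x) = some (min x y)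
      split_ifs with h1 <;> simp [min_def] <;> omega
    rw [h, ih]

theorem foldl_minStep_eq_min? (l : List Int) :
    l.foldl minStep none = PySem.List.min? l (fun y => y) := by
  cases l with
  | nil => rfl
  | cons x t =>
    rw [PySem.List.min?_id_cons]
    simp only [List.foldl_cons]
    exact foldl_some_minStep t x

theorem lastD_cons (p j : Int) (t : List Int) : lastD p (j :: t) = lastD j t := by
  cases t with
  | nil => rfl
  | cons h tl =>
    unfold lastD
    rw [List.getLast?_cons_cons]
    cases hl : (h :: tl).getLast? with
    | none => simp [List.getLast?_eq_none_iff] at hl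
    | some x => simp

theorem flush_len (c : Int) (hc : 1 ≤ c) :
    PySem.Str.len (if c = 1 then "" else PySem.Int.toStr c)
      = (if c > 1 then PySem.Str.len (PySem.Int.toStr c) else 0) := by
  by_cases h : c = 1
  · simp [h]
  · have h1 : c > 1 := by omega
    simp [h, h1]

-- loop correspondence: A's inner loop over indices vs the chunk-pair loop sStep
theorem core (s : String) (i : Int) (t : List Int) : ∀ (p : Int) (temp : String) (total count : Int),
    PySem.Str.len temp = total → 1 ≤ count →
    ((t.foldl (aStep s i) (temp, chunkF s i p, count)).2.1 = chunkF s i (lastD p t)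
     ∧ PySem.Str.len (t.foldl (aStep s i) (temp, chunkF s i p, count)).1
         = (((p :: t).zip t).foldl (fun st pr => sStep st (chunkF s i pr.1, chunkF s i pr.2)) (total, count)).1
     ∧ (t.foldl (aStep s i) (temp, chunkF s i p, count)).2.2
         = (((p :: t).zip t).foldl (fun st pr => sStep st (chunkF s i pr.1, chunkF s i pr.2)) (total, count)).2
     ∧ 1 ≤ (t.foldl (aStep s i) (temp, chunkF s i p, count)).2.2) := by
  induction t with
  | nil =>
    intro p temp total count h1 h2
    exact ⟨rfl, h1, rfl, h2⟩
  | cons j t ih =>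
    intro p temp total count h1 h2
    simp only [List.zip_cons_cons, List.foldl_cons]
    rw [lastD_cons]
    by_cases h : chunkF s i j = chunkF s i p
    · have hA : aStep s i (temp, chunkF s i p, count) j = (temp, chunkF s i j, count + 1) := by
        simp only [aStep]
        rw [if_pos (show PySem.Str.slice s (some j) (some (j + i)) = (temp, chunkF s i p, count).2.1 from h)]
        rw [show ((temp, chunkF s i p, count).1, (temp, chunkF s i p, count).2.1,
              (temp, chunkF s i p, count).2.2 + 1) = (temp, chunkF s i p, count + 1) from rfl, h]
      have hB : sStep (total, count) (chunkF s i p, chunkF s i j) = (total, count + 1) := by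
        simp only [sStep]
        rw [if_pos (show (chunkF s i p, chunkF s i j).2 = (chunkF s i p, chunkF s i j).1 from h)]
      rw [hA, hB]
      exact ih j temp total (count + 1) h1 (by omega)
    · have hA : aStep s i (temp, chunkF s i p, count) j
          = (temp ++ (if count = 1 then "" else PySem.Int.toStr count) ++ chunkF s i p,
             chunkF s i j, 1) := by
        simp only [aStep]
        rw [if_neg (show ¬ PySem.Str.slice s (some j) (some (j + i)) = (temp, chunkF s i p, count).2.1 from h)]
        rfl
      have hB : sStep (total, count) (chunkF s i p, chunkF s i j)
          = (total + (if count > 1 then PySem.Str.len (PySem.Int.toStr count) else 0)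
               + PySem.Str.len (chunkF s i p), 1) := by
        simp only [sStep]
        rw [if_neg (show ¬ (chunkF s i p, chunkF s i j).2 = (chunkF s i p, chunkF s i j).1 from h)]
      rw [hA, hB]
      refine ih j _ _ 1 ?_ le_rfl
      rw [PySem.Str.len_append, PySem.Str.len_append, h1, flush_len count h2]

theorem chunkF_len_empty (s : String) (i : Int) (hi : 0 ≤ i) :
    chunkF s i (PySem.Str.len s) = "" := by
  have h0 : (0 : Int) ≤ PySem.Str.len s := by rw [PySem.Str.len_eq]; positivity
  unfold chunkF
  simp only [PySem.Str.slice, PySem.Chars.slice]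
  rw [PySem.List.slice_toNat _ h0 (by omega)]
  rw [show (PySem.Str.len s).toNat = s.toList.length from by rw [PySem.Str.len_eq]; omega]
  simp

theorem chunkF_zero (s : String) (i : Int) :
    chunkF s i 0 = PySem.Str.slice s none (some i) := by
  simp [chunkF, PySem.Str.slice, PySem.Chars.slice]

-- toList of a chunk is take/drop on the character list
theorem toList_chunkF (s : String) (i j : Int) (hi : 0 ≤ i) (hj : 0 ≤ j) :
    (chunkF s i j).toList = (s.toList.drop j.toNat).take i.toNat := by
  unfold chunkF
  simp only [PySem.Str.toList_slice]
  rw [show PySem.Chars.slice s.toList (some j) (some (j + i))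
        = PySem.List.slice s.toList (some j) (some (j + i)) from by simp]
  rw [PySem.List.slice_toNat _ hj (by omega)]
  congr 1
  omega

-- length of a full-length chunk and of the final, possibly short, chunk
theorem len_chunkF_last (s : String) (i L : Int) (h0 : 0 ≤ L) (h1 : L ≤ PySem.Str.len s)
    (h2 : PySem.Str.len s ≤ L + i) : PySem.Str.len (chunkF s i L) = PySem.Str.len s - L := by
  rw [PySem.Str.len_eq] at h1 h2 ⊢
  rw [PySem.Str.len_eq]
  rw [show (chunkF s i L).toList = (s.toList.drop L.toNat).take i.toNat from
    toList_chunkF s i L (by omega) h0]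
  simp only [List.length_take, List.length_drop]
  omega


theorem pyRange_snoc_of_dvd (n i : Int) (hi : 0 < i) (h2 : 2 * i ≤ n) (hd : i ∣ n) :
    PySem.List.pyRange i (n + 1) i = PySem.List.pyRange i n i ++ [n] := by
  have hne : i ≠ 0 := by omega
  have hkey : n / i * i = n := Int.ediv_mul_cancel hd
  have hq : 2 ≤ n / i := by rw [Int.le_ediv_iff_mul_le hi]; omega
  rw [PySem.List.pyRange_of_pos _ _ hi, PySem.List.pyRange_of_pos _ _ hi]
  rw [if_pos (show i < n + 1 by omega), if_pos (show i < n by omega)]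
  rw [show n + 1 - i + i - 1 = n from by ring]
  rw [show n - i + i - 1 = (i - 1) + (n / i - 1) * i from by linear_combination -hkey]
  rw [Int.add_mul_ediv_right _ _ hne,
      Int.ediv_eq_zero_of_lt (show (0:Int) ≤ i - 1 by omega) (show i - 1 < i by omega), zero_add]
  rw [show (n / i).toNat = (n / i - 1).toNat + 1 from by omega]
  rw [List.range_succ, List.map_append]
  congr 1
  simp only [List.map_cons, List.map_nil]
  congr 1
  rw [show ((n / i - 1).toNat : Int) = n / i - 1 from by omega]
  linear_combination hkey

-- range(i, n+1, i) = range(i, n, i) when i does not divide n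
theorem pyRange_eq_of_not_dvd (n i : Int) (hi : 0 < i) (h2 : 2 * i ≤ n) (hd : ¬ i ∣ n) :
    PySem.List.pyRange i (n + 1) i = PySem.List.pyRange i n i := by
  have hne : i ≠ 0 := by omega
  have hkey : i * (n / i) + n % i = n := Int.mul_ediv_add_emod n i
  have hr0 : n % i ≠ 0 := fun h => hd (Int.dvd_of_emod_eq_zero h)
  have hrn : 0 ≤ n % i := Int.emod_nonneg n hne
  have hri : n % i < i := Int.emod_lt_of_pos n hi
  have hcount : (n + 1 - i + i - 1) / i = (n - i + i - 1) / i := by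
    rw [show n + 1 - i + i - 1 = (n % i) + (n / i) * i from by linear_combination -hkey,
        show n - i + i - 1 = (n % i - 1) + (n / i) * i from by linear_combination -hkey,
        Int.add_mul_ediv_right _ _ hne, Int.add_mul_ediv_right _ _ hne,
        Int.ediv_eq_zero_of_lt (show (0:Int) ≤ n % i - 1 by omega) (show n % i - 1 < i by omega),
        Int.ediv_eq_zero_of_lt (show (0:Int) ≤ n % i by omega) (show n % i < i by omega)]
  rw [PySem.List.pyRange_of_pos _ _ hi, PySem.List.pyRange_of_pos _ _ hi]
  rw [if_pos (show i < n + 1 by omega), if_pos (show i < n by omega)]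
  rw [hcount]


theorem aFlushLen_mk (a b : String) (c : Int) :
    aFlushLen (a, b, c) = PySem.Str.len (a ++ (if c = 1 then "" else PySem.Int.toStr c) ++ b) := rfl

theorem aFlushLen_val (st : String × String × Int) (h : 1 ≤ st.2.2) :
    aFlushLen st = PySem.Str.len st.1
      + (if st.2.2 > 1 then PySem.Str.len (PySem.Int.toStr st.2.2) else 0)
      + PySem.Str.len st.2.1 := by
  unfold aFlushLen
  rw [PySem.Str.len_append, PySem.Str.len_append, flush_len _ h]

-- ===== the LCP table is correct =====

theorem replicate_eq_rowSpec (s : String) :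
    List.replicate (PySem.Str.len s + 1).toNat (0 : Int)
      = rowSpec s.toList ((s.toList.length : Int)) := by
  unfold rowSpec
  symm
  rw [List.eq_replicate_iff]
  constructor
  · simp [PySem.List.length_pyRange_one, PySem.Str.len_eq]
  · intro b hb
    rw [List.mem_map] at hb
    obtain ⟨k, hk, rfl⟩ := hb
    have hdrop : List.drop ((s.toList.length : Int)).toNat s.toList = [] := by
      rw [show ((s.toList.length : Int)).toNat = s.toList.length from by omega]
      simp
    rw [hdrop]
    cases s.toList.drop k.toNat <;> rfl

theorem bRow_eq_rowSpec (s : String) (a : Int) (h0 : 0 ≤ a) (h1 : a < (s.toList.length : Int)) :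
    bRow s ((s.toList.length : Int)) (rowSpec s.toList (a + 1)) a = rowSpec s.toList a := by
  unfold bRow
  conv_rhs => rw [rowSpec]
  rw [PySem.List.pyRange_one_succ_right (by positivity : (0:Int) ≤ (s.toList.length : Int))]
  rw [List.map_append]
  congr 1
  · apply List.map_congr_left
    intro b hb
    rw [PySem.List.mem_pyRange_one] at hb
    have hga : PySem.Str.pyGet? s a = some s.toList[a.toNat] := by
      simp only [PySem.Str.pyGet?_eq, PySem.Chars.pyGet?_eq_listPyGet?]
      exact PySem.List.pyGet?_eq_some_getElem s.toList h0 h1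
    have hgb : PySem.Str.pyGet? s b = some s.toList[b.toNat] := by
      simp only [PySem.Str.pyGet?_eq, PySem.Chars.pyGet?_eq_listPyGet?]
      exact PySem.List.pyGet?_eq_some_getElem s.toList hb.1 (by omega)
    have hlk : PySem.List.pyGet? (rowSpec s.toList (a + 1)) (b + 1)
        = some (lcpC (s.toList.drop (a + 1).toNat) (s.toList.drop (b + 1).toNat)) := by
      unfold rowSpec
      rw [PySem.List.pyGet?_of_nonneg _ (by omega)]
      rw [show ((s.toList.length : Int) + 1) = ((s.toList.length + 1 : Nat) : Int) from by push_cast; ring]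
      rw [PySem.List.getElem?_map_pyRange_zero _ (s.toList.length + 1) (b + 1).toNat (by omega)]
      rw [Int.toNat_natCast]
    rw [hga, hgb, hlk]
    simp only [Option.getD_some, Option.some.injEq]
    rw [List.drop_eq_getElem_cons (show a.toNat < s.toList.length by omega),
        List.drop_eq_getElem_cons (show b.toNat < s.toList.length by omega)]
    simp only [lcpC]
    rw [show a.toNat + 1 = (a + 1).toNat from by omega,
        show b.toNat + 1 = (b + 1).toNat from by omega]
  · simp only [List.map_cons, List.map_nil]
    have hdrop : List.drop ((s.toList.length : Int)).toNat s.toList = [] := by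
      rw [show ((s.toList.length : Int)).toNat = s.toList.length from by omega]
      simp
    rw [hdrop]
    have : lcpC (s.toList.drop a.toNat) [] = 0 := by
      cases s.toList.drop a.toNat <;> rfl
    rw [this]

theorem table_down (s : String) : ∀ (k : Nat) (a : Int), a = (k : Int) → a ≤ (s.toList.length : Int) →
    (PySem.List.pyRange (a - 1) (-1) (-1)).foldl
      (fun lcp x => bRow s ((s.toList.length : Int)) ((PySem.List.pyGet? lcp 0).getD []) x :: lcp)
      ((PySem.List.pyRange a ((s.toList.length : Int) + 1) 1).map (rowSpec s.toList))
    = (PySem.List.pyRange 0 ((s.toList.length : Int) + 1) 1).map (rowSpec s.toList) := by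
  intro k
  induction k with
  | zero =>
    intro a ha _
    rw [ha]
    rw [PySem.List.pyRange_neg_one_eq_nil (by norm_num)]
    simp
  | succ k ih =>
    intro a ha hle
    rw [PySem.List.pyRange_neg_one_cons (show (-1:Int) < a - 1 by omega)]
    rw [List.foldl_cons]
    have hcons : (PySem.List.pyRange a ((s.toList.length : Int) + 1) 1).map (rowSpec s.toList)
        = rowSpec s.toList a :: (PySem.List.pyRange (a + 1) ((s.toList.length : Int) + 1) 1).map (rowSpec s.toList) := by
      rw [PySem.List.pyRange_one_cons (by omega)]
      simp
    rw [hcons, PySem.List.pyGet?_zero_cons]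
    simp only [Option.getD_some]
    rw [show rowSpec s.toList a = rowSpec s.toList ((a - 1) + 1) from by norm_num]
    rw [bRow_eq_rowSpec s (a - 1) (by omega) (by omega)]
    rw [show a - 1 + 1 = a from by ring]
    have hcons2 : (PySem.List.pyRange (a - 1) ((s.toList.length : Int) + 1) 1).map (rowSpec s.toList)
        = rowSpec s.toList (a - 1) :: (PySem.List.pyRange a ((s.toList.length : Int) + 1) 1).map (rowSpec s.toList) := by
      rw [PySem.List.pyRange_one_cons (by omega)]
      simp only [List.map_cons]
      norm_num
    rw [← hcons, ← hcons2]
    exact ih (a - 1) (by omega) (by omega)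

theorem bTable_eq (s : String) :
    bTable s = (PySem.List.pyRange 0 ((s.toList.length : Int) + 1) 1).map (rowSpec s.toList) := by
  unfold bTable
  rw [PySem.Str.len_eq]
  have hinit : [List.replicate ((s.toList.length : Int) + 1).toNat (0 : Int)]
      = (PySem.List.pyRange ((s.toList.length : Int)) ((s.toList.length : Int) + 1) 1).map (rowSpec s.toList) := by
    rw [PySem.List.pyRange_one_singleton]
    simp only [List.map_cons, List.map_nil]
    congr 1
    rw [show ((s.toList.length : Int) + 1).toNat = (PySem.Str.len s + 1).toNat from by rw [PySem.Str.len_eq]]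
    exact replicate_eq_rowSpec s
  rw [hinit]
  exact table_down s s.toList.length ((s.toList.length : Int)) rfl le_rfl

theorem table_lookup (s : String) (a b : Int) (ha0 : 0 ≤ a) (ha1 : a ≤ (s.toList.length : Int))
    (hb0 : 0 ≤ b) (hb1 : b ≤ (s.toList.length : Int)) :
    (PySem.List.pyGet? ((PySem.List.pyGet? (bTable s) a).getD []) b).getD 0
      = lcpC (s.toList.drop a.toNat) (s.toList.drop b.toNat) := by
  rw [bTable_eq]
  rw [PySem.List.pyGet?_of_nonneg _ ha0]
  rw [show ((s.toList.length : Int) + 1) = ((s.toList.length + 1 : Nat) : Int) from by push_cast; ring]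
  rw [PySem.List.getElem?_map_pyRange_zero _ (s.toList.length + 1) a.toNat (by omega)]
  simp only [Option.getD_some]
  unfold rowSpec
  rw [PySem.List.pyGet?_of_nonneg _ hb0]
  rw [show ((s.toList.length : Int) + 1) = ((s.toList.length + 1 : Nat) : Int) from by push_cast; ring]
  rw [PySem.List.getElem?_map_pyRange_zero _ (s.toList.length + 1) b.toNat (by omega)]
  simp only [Option.getD_some, Int.toNat_natCast]

theorem chunk_eq_iff (s : String) (i b : Int) (hi : 1 ≤ i) (hb : i ≤ b)
    (hbn : b < (s.toList.length : Int)) :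
    (chunkF s i b = chunkF s i (b - i))
      ↔ ((s.toList.length : Int) - b ≥ i
          ∧ lcpC (s.toList.drop (b - i).toNat) (s.toList.drop b.toNat) ≥ i) := by
  have hcast : ((i.toNat : Nat) : Int) = i := by omega
  have hlx : (s.toList.drop (b - i).toNat).length = s.toList.length - (b - i).toNat := by
    simp
  have hly : (s.toList.drop b.toNat).length = s.toList.length - b.toNat := by
    simp
  have hkey := take_eq_iff_lcp i.toNat (s.toList.drop (b - i).toNat) (s.toList.drop b.toNat)
    (by rw [hlx]; omega)
  rw [← String.toList_inj, toList_chunkF s i b (by omega) (by omega),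
      toList_chunkF s i (b - i) (by omega) (by omega)]
  constructor
  · intro h
    have h2 := hkey.1 h.symm
    rw [hly] at h2
    exact ⟨by omega, by omega⟩
  · intro h
    exact (hkey.2 ⟨by rw [hly]; omega, by omega⟩).symm

theorem zip_cons_map_range {β : Type} (cnt : Nat) : ∀ (x : β) (g : Nat → β),
    (x :: (List.range cnt).map g).zip ((List.range cnt).map g)
      = (List.range cnt).map (fun k => (if k = 0 then x else g (k - 1), g k)) := by
  induction cnt with
  | zero => intro x g; simp
  | succ cnt ih =>
    intro x g
    rw [List.range_succ_eq_map]
    simp only [List.map_cons, List.map_map]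
    rw [List.zip_cons_cons]
    rw [ih (g 0) (g ∘ Nat.succ)]
    congr 1
    apply List.map_congr_left
    intro k _
    cases k with
    | zero => simp
    | succ k => simp [Function.comp]

theorem zip_pyRange_shift (i n : Int) (hi : 0 < i) :
    ((0 :: PySem.List.pyRange i n i).zip (PySem.List.pyRange i n i))
      = (PySem.List.pyRange i n i).map (fun b => (b - i, b)) := by
  rw [PySem.List.pyRange_of_pos _ _ hi]
  rw [zip_cons_map_range _ 0 _]
  rw [List.map_map]
  apply List.map_congr_left
  intro k _
  cases k with
  | zero => simp
  | succ k =>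
    simp only [Function.comp_apply]
    rw [if_neg (Nat.succ_ne_zero k)]
    rw [show k + 1 - 1 = k from rfl]
    push_cast
    rw [Prod.mk.injEq]
    constructor <;> ring

theorem lastD_pyRange (n i : Int) (hi : 1 ≤ i) (h2 : 2 * i ≤ n) :
    lastD 0 (PySem.List.pyRange i n i) = (n - 1) / i * i := by
  have hq1 : 1 ≤ (n - 1) / i := by
    rw [Int.le_ediv_iff_mul_le (by omega)]
    omega
  rw [PySem.List.pyRange_of_pos _ _ (by omega)]
  rw [if_pos (by omega : i < n)]
  rw [show n - i + i - 1 = n - 1 from by ring]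
  unfold lastD
  rw [List.getLast?_map, List.getLast?_range]
  rw [if_neg (by omega : ¬ ((n-1)/i).toNat = 0)]
  simp only [Option.map_some, Option.getD_some]
  rw [show (((n-1)/i).toNat - 1 : Nat) = (((n-1)/i - 1 : Int)).toNat from by omega]
  rw [Int.toNat_of_nonneg (by omega)]
  ring

theorem len_chunkF_full (s : String) (i a : Int) (h0 : 0 ≤ a) (hi : 0 ≤ i)
    (h1 : a + i ≤ PySem.Str.len s) : PySem.Str.len (chunkF s i a) = i := by
  rw [PySem.Str.len_eq] at h1 ⊢
  rw [toList_chunkF s i a hi h0]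
  simp only [List.length_take, List.length_drop]
  omega

theorem valA_eq_valN (s : String) (i : Int) (hi : 1 ≤ i) (h2 : 2 * i ≤ PySem.Str.len s) :
    valA s i = bTotal s (bTable s) i := by
  have hi0 : 0 < i := by omega
  have hlen : PySem.Str.len s = (s.toList.length : Int) := PySem.Str.len_eq s
  have hnn : (0:Int) ≤ PySem.Str.len s := by rw [hlen]; positivity
  unfold bTotal
  rw [show PySem.Int.floordiv (PySem.Str.len s - 1) i = (PySem.Str.len s - 1) / i from
    PySem.Int.floordiv_eq_ediv_of_pos (by omega)]
  have hconv : (PySem.List.pyRange i (PySem.Str.len s) i).foldl (bStepN s (bTable s) i) (0, 1)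
      = (PySem.List.pyRange i (PySem.Str.len s) i).foldl
          (fun st b => sStep st (chunkF s i (b - i), chunkF s i b)) (0, 1) := by
    apply PySem.List.foldl_congr_mem
    intro st b hb
    rw [PySem.List.mem_pyRange_iff_of_pos hi0] at hb
    have hlk : (PySem.List.pyGet? ((PySem.List.pyGet? (bTable s) (b - i)).getD []) b).getD 0
        = lcpC (s.toList.drop (b - i).toNat) (s.toList.drop b.toNat) :=
      table_lookup s (b - i) b (by omega) (by omega) (by omega) (by omega)
    have hcond := chunk_eq_iff s i b hi hb.1 (by omega)
    rw [← hlen] at hcond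
    unfold bStepN sStep
    rw [hlk]
    by_cases hc : chunkF s i b = chunkF s i (b - i)
    · rw [if_pos (hcond.1 hc), if_pos hc]
    · rw [if_neg (fun hx => hc (hcond.2 hx)), if_neg hc]
      rw [len_chunkF_full s i (b - i) (by omega) (by omega) (by omega)]
  rw [hconv]
  have hzip : (PySem.List.pyRange i (PySem.Str.len s) i).foldl
        (fun st b => sStep st (chunkF s i (b - i), chunkF s i b)) (0, 1)
      = ((0 :: PySem.List.pyRange i (PySem.Str.len s) i).zip
            (PySem.List.pyRange i (PySem.Str.len s) i)).foldl
          (fun st pr => sStep st (chunkF s i pr.1, chunkF s i pr.2)) (0, 1) := by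
    rw [zip_pyRange_shift i (PySem.Str.len s) hi0]
    rw [List.foldl_map]
  rw [hzip]
  obtain ⟨e1, e2, e3, e4⟩ :=
    core s i (PySem.List.pyRange i (PySem.Str.len s) i) 0 "" 0 1 (by simp) le_rfl
  have hL : lastD 0 (PySem.List.pyRange i (PySem.Str.len s) i) = (PySem.Str.len s - 1) / i * i :=
    lastD_pyRange (PySem.Str.len s) i hi h2
  have hmod : (PySem.Str.len s - 1) / i * i = PySem.Str.len s - 1 - (PySem.Str.len s - 1) % i := by
    have h := Int.mul_ediv_add_emod (PySem.Str.len s - 1) i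
    have h' : (PySem.Str.len s - 1) / i * i = i * ((PySem.Str.len s - 1) / i) := mul_comm _ _
    omega
  have hm0 : 0 ≤ (PySem.Str.len s - 1) % i := Int.emod_nonneg _ (by omega)
  have hm1 : (PySem.Str.len s - 1) % i < i := Int.emod_lt_of_pos _ hi0
  have hLlen : PySem.Str.len (chunkF s i (lastD 0 (PySem.List.pyRange i (PySem.Str.len s) i)))
      = PySem.Str.len s - (PySem.Str.len s - 1) / i * i := by
    rw [hL]
    exact len_chunkF_last s i _ (by omega) (by omega) (by omega)
  unfold valA
  rw [← chunkF_zero s i]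
  by_cases hd : i ∣ PySem.Str.len s
  · rw [pyRange_snoc_of_dvd (PySem.Str.len s) i hi0 h2 hd, List.foldl_append]
    set stA := List.foldl (aStep s i) ("", chunkF s i 0, 1)
      (PySem.List.pyRange i (PySem.Str.len s) i) with hstA
    simp only [List.foldl_cons, List.foldl_nil]
    have hne : ¬ (PySem.Str.slice s (some (PySem.Str.len s)) (some (PySem.Str.len s + i)) = stA.2.1) := by
      rw [e1, show PySem.Str.slice s (some (PySem.Str.len s)) (some (PySem.Str.len s + i))
            = chunkF s i (PySem.Str.len s) from rfl, chunkF_len_empty s i (by omega)]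
      intro hcontra
      rw [← hcontra] at hLlen
      have : PySem.Str.len "" = 0 := by simp
      omega
    have hstep : aStep s i stA (PySem.Str.len s)
        = (stA.1 ++ (if stA.2.2 = 1 then "" else PySem.Int.toStr stA.2.2) ++ stA.2.1,
           chunkF s i (PySem.Str.len s), 1) := by
      unfold aStep
      rw [if_neg hne]
      rfl
    rw [hstep, aFlushLen_mk, if_pos rfl, chunkF_len_empty s i (by omega)]
    simp only [PySem.Str.len_append]
    rw [flush_len _ e4, e2, e3, e1, hLlen]
    have hz : PySem.Str.len "" = 0 := by simp
    rw [hz]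
    omega
  · rw [pyRange_eq_of_not_dvd (PySem.Str.len s) i hi0 h2 hd]
    rw [aFlushLen_val _ e4, e2, e3, e1, hLlen]

-- ===== VERDICT (by name: the statement is the Claim_ definition above) =====
theorem solution_spec : Claim_equal_solution := by
  intro s _ hpre
  unfold Spec_solution
  rw [solution_as_valA, solution_alt_as_valN, foldl_minStep_eq_min?]
  have hmap : (PySem.List.pyRange 1 (PySem.Int.floordiv (PySem.Str.len s) 2 + 1) 1).map (valA s)
      = (PySem.List.pyRange 1 (PySem.Int.floordiv (PySem.Str.len s) 2 + 1) 1).map (bTotal s (bTable s)) := by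
    apply List.map_congr_left
    intro i hi
    rw [PySem.List.mem_pyRange_one] at hi
    have hfd : PySem.Int.floordiv (PySem.Str.len s) 2 = PySem.Str.len s / 2 :=
      PySem.Int.floordiv_eq_ediv_of_pos (by omega)
    rw [hfd] at hi
    exact valA_eq_valN s i hi.1 (by omega)
  rw [hmap]
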